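-- pv_equiv track=rewrite | github.com/Oscarhendrix666/Lab2_seg_info | lab2.py | cifrar_rot_n
-- ===== SOURCE A (Python) =====
-- def cifrar_rot_n(texto, n):
--     resultado = ""
--     for caracter in texto:
--         if caracter.isalpha():
--             offset = 65 if caracter.isupper() else 97  # Asegurar que estamos trabajando con letras mayúsculas o minúsculas
--             resultado += chr((ord(caracter) - offset + n) % 26 + offset)
--         else:
--             resultado += caracter
--     return resultado
-- ===== SOURCE B (Python) =====
-- def cifrar_rot_n(texto, n):
--     # Normalize the shift once, then two staged passes:
--     # stage 1 shifts every letter's code by k without wrapping,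
--     # stage 2 wraps any code that ran past its alphabet's end.
--     k = n % 26
--     codes = [ord(c) + k if c.isalpha() else ord(c) for c in texto]
--     out = []
--     for c, o in zip(texto, codes):
--         if c.isalpha():
--             end = 90 if c.isupper() else 122
--             if o > end:
--                 o -= 26
--         out.append(chr(o))
--     return ''.join(out)
-- ===== Notes on version B (the rewrite author's own statement) =====
-- stated objective: alternative
-- what changed: B normalizes the shift to k = n % 26 once, then runs two staged passes: a first pass shifting every letter's code by k without wrapping, and a second pass that wraps overflowed codes by a single conditional subtraction of 26 — instead of A's single pass computing chr((ord(c)-offset+n)%26+offset) per character with repeated string concatenation.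
import Mathlib
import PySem

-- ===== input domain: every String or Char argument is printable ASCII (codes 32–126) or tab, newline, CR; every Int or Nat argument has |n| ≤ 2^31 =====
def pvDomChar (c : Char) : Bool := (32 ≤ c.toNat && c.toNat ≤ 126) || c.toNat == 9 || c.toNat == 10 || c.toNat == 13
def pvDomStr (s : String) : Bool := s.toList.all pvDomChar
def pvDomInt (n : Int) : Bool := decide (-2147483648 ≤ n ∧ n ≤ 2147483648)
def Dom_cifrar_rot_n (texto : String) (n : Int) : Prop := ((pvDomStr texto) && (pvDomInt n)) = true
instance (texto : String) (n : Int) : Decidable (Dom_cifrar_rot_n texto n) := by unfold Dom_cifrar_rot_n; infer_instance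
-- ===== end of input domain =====

-- B normalizes the shift once (k = n % 26) and runs two staged passes — shift without wrapping, then wrap by a single conditional subtraction — instead of A's single pass computing a modulus per character.

-- ===== PORT A =====
def cifrar_rot_n (texto : String) (n : Int) : String :=
  String.mk (texto.toList.foldl (fun resultado caracter =>
    if PySem.Chars.isalpha caracter then
      let offset : Int := if PySem.Chars.isupper caracter then 65 else 97
      resultado ++ [Char.ofNat ((PySem.Int.mod ((caracter.toNat : Int) - offset + n) 26) + offset).toNat]
    else
      resultado ++ [caracter]) [])

-- ===== PORT B =====
def cifrar_rot_n_alt (texto : String) (n : Int) : String :=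
  let k := PySem.Int.mod n 26
  -- stage 1: shift every letter's code by k, no wrap yet
  let codes := texto.toList.map (fun c =>
    if PySem.Chars.isalpha c then (c.toNat : Int) + k else (c.toNat : Int))
  -- stage 2: wrap any code past its alphabet's end, building the output pieces
  String.mk ((texto.toList.zip codes).foldl (fun out p =>
    let o := if PySem.Chars.isalpha p.1 then
               let e : Int := if PySem.Chars.isupper p.1 then 90 else 122
               if e < p.2 then p.2 - 26 else p.2
             else p.2
    out ++ [Char.ofNat o.toNat]) [])

-- ===== PRECONDITION & SPEC =====
def Spec_cifrar_rot_n (texto : String) (n : Int) (out : String) : Prop := out = cifrar_rot_n_alt texto n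
instance (texto : String) (n : Int) (out : String) : Decidable (Spec_cifrar_rot_n texto n out) := by unfold Spec_cifrar_rot_n; infer_instance

-- ===== CLAIM =====
def Claim_equal_cifrar_rot_n : Prop := ∀ (texto : String) (n : Int), Dom_cifrar_rot_n texto n → Spec_cifrar_rot_n texto n (cifrar_rot_n texto n)

-- ===== LEMMAS AND PROOFS =====

-- the two per-character results agree
lemma pvCharStep (n : Int) (c : Char) :
    [Char.ofNat (if PySem.Chars.isalpha c then
        ((PySem.Int.mod ((c.toNat : Int) - (if PySem.Chars.isupper c then (65:Int) else 97) + n) 26)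
          + (if PySem.Chars.isupper c then (65:Int) else 97)).toNat
      else c.toNat)]
    = [Char.ofNat (if PySem.Chars.isalpha c then
        (if (if PySem.Chars.isupper c then (90:Int) else 122) < (c.toNat : Int) + PySem.Int.mod n 26
         then (c.toNat : Int) + PySem.Int.mod n 26 - 26
         else (c.toNat : Int) + PySem.Int.mod n 26).toNat
      else c.toNat)] := by
  have hmod : ∀ a : Int, PySem.Int.mod a 26 = a % 26 :=
    fun a => PySem.Int.mod_eq_emod_of_pos (by omega)
  have hU : (PySem.Chars.isupper c = true) ↔ (65 ≤ c.toNat ∧ c.toNat ≤ 90) := by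
    unfold PySem.Chars.isupper
    simp [Char.le_def, UInt32.le_iff_toNat_le]
  have hL : (PySem.Chars.islower c = true) ↔ (97 ≤ c.toNat ∧ c.toNat ≤ 122) := by
    unfold PySem.Chars.islower
    simp [Char.le_def, UInt32.le_iff_toNat_le]
  unfold PySem.Chars.isalpha
  cases hu : PySem.Chars.isupper c with
  | true =>
    have hr := hU.mp hu
    simp only [Bool.true_or, if_true]
    rw [hmod, hmod]
    refine congrArg (fun x => [Char.ofNat x]) ?_
    split_ifs with h <;> omega
  | false =>
    cases hl : PySem.Chars.islower c with
    | true =>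
      have hr := hL.mp hl
      simp only [Bool.false_or, if_true, if_false, Bool.false_eq_true]
      rw [hmod, hmod]
      refine congrArg (fun x => [Char.ofNat x]) ?_
      split_ifs with h <;> omega
    | false => simp

-- A's fold as a map
lemma pvFoldA (n : Int) (l : List Char) (acc : List Char) :
    l.foldl (fun resultado caracter =>
      if PySem.Chars.isalpha caracter then
        resultado ++ [Char.ofNat ((PySem.Int.mod ((caracter.toNat : Int) - (if PySem.Chars.isupper caracter then (65:Int) else 97) + n) 26)
          + (if PySem.Chars.isupper caracter then (65:Int) else 97)).toNat]
      else resultado ++ [caracter]) acc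
    = acc ++ l.map (fun c =>
        Char.ofNat (if PySem.Chars.isalpha c then
          ((PySem.Int.mod ((c.toNat : Int) - (if PySem.Chars.isupper c then (65:Int) else 97) + n) 26)
            + (if PySem.Chars.isupper c then (65:Int) else 97)).toNat
        else c.toNat)) := by
  induction l generalizing acc with
  | nil => simp
  | cons c t ih =>
    simp only [List.foldl_cons, List.map_cons]
    rw [ih]
    by_cases ha : PySem.Chars.isalpha c = true
    · simp [ha]
    · simp only [Bool.not_eq_true] at ha
      simp [ha, Char.ofNat_toNat]

-- B's zip-fold as a map
lemma pvFoldB (k : Int) (l : List Char) (acc : List Char) :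
    (l.zip (l.map (fun c => if PySem.Chars.isalpha c then (c.toNat : Int) + k else (c.toNat : Int)))).foldl
      (fun out p =>
        let o := if PySem.Chars.isalpha p.1 then
                   let e : Int := if PySem.Chars.isupper p.1 then 90 else 122
                   if e < p.2 then p.2 - 26 else p.2
                 else p.2
        out ++ [Char.ofNat o.toNat]) acc
    = acc ++ l.map (fun c =>
        Char.ofNat (if PySem.Chars.isalpha c then
          (if (if PySem.Chars.isupper c then (90:Int) else 122) < (c.toNat : Int) + k
           then (c.toNat : Int) + k - 26
           else (c.toNat : Int) + k).toNat
        else c.toNat)) := by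
  induction l generalizing acc with
  | nil => simp
  | cons c t ih =>
    simp only [List.map_cons, List.zip_cons_cons, List.foldl_cons]
    rw [ih]
    by_cases ha : PySem.Chars.isalpha c = true
    · simp [ha]
    · simp only [Bool.not_eq_true] at ha
      simp [ha]

-- ===== VERDICT =====
theorem cifrar_rot_n_spec : Claim_equal_cifrar_rot_n := by
  intro texto n _
  unfold Spec_cifrar_rot_n
  simp only [cifrar_rot_n, cifrar_rot_n_alt]
  rw [pvFoldA n texto.toList [], pvFoldB (PySem.Int.mod n 26) texto.toList []]
  simp only [List.nil_append]
  congr 1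
  apply List.map_congr_left
  intro c _
  have h := pvCharStep n c
  simpa using h
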